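-- pv_equiv track=rewrite | github.com/DevNovaOps/Nullify | core/nulify/nlp_engine.py | _get_line_number
-- ===== SOURCE A (Python) =====
-- def _get_line_number(pos, line_starts):
--     """Get 1-indexed line number for a character position."""
--     lo, hi = 0, len(line_starts) - 1
--     while lo <= hi:
--         mid = (lo + hi) // 2
--         if line_starts[mid] <= pos:
--             lo = mid + 1
--         else:
--             hi = mid - 1
--     return lo
-- ===== SOURCE B (Python) =====
-- def _get_line_number(pos, line_starts):
--     """Get 1-indexed line number for a character position."""
--     count = 0
--     for s in line_starts:
--         if s <= pos:
--             count += 1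
--     return count
-- ===== Notes on version B (the rewrite author's own statement) =====
-- stated objective: simpler
-- what changed: Replaces the binary search over (lo, hi) index bounds with a single front-to-back pass that counts the entries <= pos (equal on sorted line-start lists, which is the function's contract).
-- outside the precondition, e.g. on _get_line_number(0, [5, 0]): A returns 0, B returns 1
import Mathlib
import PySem

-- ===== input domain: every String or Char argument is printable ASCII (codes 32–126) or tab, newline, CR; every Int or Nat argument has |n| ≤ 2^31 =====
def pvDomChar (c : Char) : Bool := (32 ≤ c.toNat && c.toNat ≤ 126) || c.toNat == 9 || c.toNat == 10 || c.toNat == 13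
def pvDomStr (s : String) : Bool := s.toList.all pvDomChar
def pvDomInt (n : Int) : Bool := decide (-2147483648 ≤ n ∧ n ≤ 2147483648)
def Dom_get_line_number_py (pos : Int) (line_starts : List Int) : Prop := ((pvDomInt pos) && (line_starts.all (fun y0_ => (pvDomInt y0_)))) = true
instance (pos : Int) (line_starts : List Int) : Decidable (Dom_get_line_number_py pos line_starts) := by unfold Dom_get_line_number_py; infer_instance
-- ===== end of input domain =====

-- B replaces A's binary search with one linear counting pass over the list (objective: simpler).

-- ===== PORT A =====
-- the while loop of A, recursing on the shrinking interval [lo, hi]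
def get_line_number_py_go (pos : Int) (xs : List Int) (lo hi : Int) : Int :=
  if h : lo ≤ hi then
    let mid := PySem.Int.floordiv (lo + hi) 2
    match PySem.List.pyGet? xs mid with
    | some v => if v ≤ pos then get_line_number_py_go pos xs (mid + 1) hi
                else get_line_number_py_go pos xs lo (mid - 1)
    | none => lo   -- IndexError; unreachable from the entry call (0 ≤ lo ≤ mid ≤ hi < len there)
  else lo
termination_by (hi + 1 - lo).toNat
decreasing_by
  · have := PySem.Int.floordiv_two_mid_bounds h; omega
  · have := PySem.Int.floordiv_two_mid_bounds h; omega

def get_line_number_py (pos : Int) (line_starts : List Int) : Int :=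
  get_line_number_py_go pos line_starts 0 ((line_starts.length : Int) - 1)

-- ===== PORT B =====
def get_line_number_py_alt (pos : Int) (line_starts : List Int) : Int :=
  line_starts.foldl (fun count s => if s ≤ pos then count + 1 else count) 0

-- ===== PRECONDITION & SPEC =====
-- Pre_ excludes unsorted line_starts, on which A still returns a value but that value is an
-- accident of the binary-search probe order; the function's contract (a list of line start
-- offsets) guarantees a non-decreasing list, and there A and B agree.
def Pre_get_line_number_py (pos : Int) (line_starts : List Int) : Prop :=
  line_starts.Pairwise (· ≤ ·)
instance (pos : Int) (line_starts : List Int) : Decidable (Pre_get_line_number_py pos line_starts) := by unfold Pre_get_line_number_py; infer_instance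

def pvWitness_get_line_number_py : Int × List Int := (4, [0, 3, 7])

def Spec_get_line_number_py (pos : Int) (line_starts : List Int) (out : Int) : Prop := out = get_line_number_py_alt pos line_starts
instance (pos : Int) (line_starts : List Int) (out : Int) : Decidable (Spec_get_line_number_py pos line_starts out) := by unfold Spec_get_line_number_py; infer_instance

-- ===== CLAIM (what is proved, stated in full; the proofs are below) =====
def Claim_equal_get_line_number_py : Prop := ∀ (pos : Int) (line_starts : List Int), Dom_get_line_number_py pos line_starts → Pre_get_line_number_py pos line_starts → Spec_get_line_number_py pos line_starts (get_line_number_py pos line_starts)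

-- ===== LEMMAS AND PROOFS =====

-- B's fold counts the elements ≤ pos
theorem alt_eq_countP (pos : Int) (xs : List Int) :
    get_line_number_py_alt pos xs = (xs.countP (fun s => decide (s ≤ pos)) : Int) := by
  unfold get_line_number_py_alt
  suffices h : ∀ (c : Int), xs.foldl (fun count s => if s ≤ pos then count + 1 else count) c
      = c + (xs.countP (fun s => decide (s ≤ pos)) : Int) by
    simpa using h 0
  induction xs with
  | nil => intro c; simp
  | cons x xs ih =>
    intro c
    by_cases hx : x ≤ pos <;> simp [List.countP_cons, hx, ih] <;> ring

-- any "split point" L (all entries before L are ≤ pos, all from L on are > pos) equals countP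
theorem countP_eq_split (pos : Int) (xs : List Int) (L : Int)
    (h0 : 0 ≤ L) (hlen : L ≤ (xs.length : Int))
    (hle : ∀ (i : Nat) (hi : i < xs.length), (i : Int) < L → xs[i] ≤ pos)
    (hgt : ∀ (i : Nat) (hi : i < xs.length), L ≤ (i : Int) → pos < xs[i]) :
    (xs.countP (fun s => decide (s ≤ pos)) : Int) = L := by
  have hL : L = (L.toNat : Int) := by omega
  rw [← List.take_append_drop L.toNat xs, List.countP_append]
  have htake : (xs.take L.toNat).countP (fun s => decide (s ≤ pos)) = (xs.take L.toNat).length := by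
    apply List.countP_eq_length.mpr
    intro a ha
    rcases List.mem_iff_getElem.mp ha with ⟨i, hi, rfl⟩
    have hi' : i < xs.length := lt_of_lt_of_le hi (by simpa using List.length_take_le L.toNat xs)
    have hiL : i < L.toNat := lt_of_lt_of_le hi (by simp [List.length_take])
    rw [List.getElem_take]
    simpa using hle i hi' (by omega)
  have hdrop : (xs.drop L.toNat).countP (fun s => decide (s ≤ pos)) = 0 := by
    apply List.countP_eq_zero.mpr
    intro a ha
    rcases List.mem_iff_getElem.mp ha with ⟨i, hi, rfl⟩
    rw [List.getElem_drop]
    have hi2 : L.toNat + i < xs.length := by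
      have := List.length_drop (l := xs) (i := L.toNat); omega
    have := hgt (L.toNat + i) hi2 (by omega)
    simp; omega
  rw [htake, hdrop]
  have : (xs.take L.toNat).length = L.toNat := by simp; omega
  omega

-- the binary-search loop invariant: A's loop lands exactly on the split point
theorem go_spec (pos : Int) (xs : List Int) (hsort : xs.Pairwise (· ≤ ·)) :
    ∀ (n : Nat) (lo hi : Int), (hi + 1 - lo).toNat ≤ n →
    0 ≤ lo → hi ≤ (xs.length : Int) - 1 → lo ≤ hi + 1 →
    (∀ (i : Nat) (hi' : i < xs.length), (i : Int) < lo → xs[i] ≤ pos) →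
    (∀ (i : Nat) (hi' : i < xs.length), hi < (i : Int) → pos < xs[i]) →
    let L := get_line_number_py_go pos xs lo hi
    0 ≤ L ∧ L ≤ (xs.length : Int) ∧
    (∀ (i : Nat) (hi' : i < xs.length), (i : Int) < L → xs[i] ≤ pos) ∧
    (∀ (i : Nat) (hi' : i < xs.length), L ≤ (i : Int) → pos < xs[i]) := by
  have hmono := List.pairwise_iff_getElem.mp hsort
  intro n
  induction n with
  | zero =>
    intro lo hi hn h0 hlen hlohi hle hgt
    have hstop : ¬ lo ≤ hi := by omega
    rw [get_line_number_py_go, dif_neg hstop]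
    exact ⟨h0, by omega, hle, fun i hi' h => hgt i hi' (by omega)⟩
  | succ n ih =>
    intro lo hi hn h0 hlen hlohi hle hgt
    by_cases h : lo ≤ hi
    · obtain ⟨hm1, hm2⟩ := PySem.Int.floordiv_two_mid_bounds h
      set mid := PySem.Int.floordiv (lo + hi) 2 with hmid
      have hmlt : mid.toNat < xs.length := by omega
      have hget : PySem.List.pyGet? xs mid = some xs[mid.toNat] :=
        PySem.List.pyGet?_eq_some_getElem (xs := xs) (i := mid) (by omega) (by omega)
      rw [get_line_number_py_go, dif_pos h]
      simp only [← hmid, hget]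
      by_cases hv : xs[mid.toNat] ≤ pos
      · rw [if_pos hv]
        apply ih (mid + 1) hi (by omega) (by omega) hlen (by omega)
        · intro i hi' hltm
          rcases lt_trichotomy (i : Int) (mid : Int) with hc | hc | hc
          · by_cases hilo : (i : Int) < lo
            · exact hle i hi' hilo
            · exact le_trans (hmono i mid.toNat hi' hmlt (by omega)) hv
          · have : i = mid.toNat := by omega
            subst this; exact hv
          · omega
        · exact hgt
      · rw [if_neg hv]
        apply ih lo (mid - 1) (by omega) h0 (by omega) (by omega) hle
        intro i hi' hgtm
        rcases lt_trichotomy (mid : Int) (i : Int) with hc | hc | hc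
        · by_cases hihi : hi < (i : Int)
          · exact hgt i hi' hihi
          · exact lt_of_not_ge fun hh => hv (le_trans (hmono mid.toNat i hmlt hi' (by omega)) hh)
        · have : i = mid.toNat := by omega
          subst this; omega
        · omega
    · rw [get_line_number_py_go, dif_neg h]
      exact ⟨h0, by omega, hle, fun i hi' hL => hgt i hi' (by omega)⟩

-- ===== VERDICT (by name: the statement is the Claim_ definition above) =====
theorem get_line_number_py_spec : Claim_equal_get_line_number_py := by
  intro pos xs _ hpre
  unfold Spec_get_line_number_py get_line_number_py
  have h := go_spec pos xs hpre ((xs.length : Int) - 1 + 1 - 0).toNat 0 ((xs.length : Int) - 1)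
    (le_refl _) (by omega) (by omega) (by omega)
    (by intro i hi' hlt; omega) (by intro i hi' hgt; omega)
  obtain ⟨h0, hlen, hle, hgt⟩ := h
  rw [alt_eq_countP, countP_eq_split pos xs _ h0 hlen hle hgt]
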